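-- pv_equiv track=rewrite | github.com/truera/trulens | src/connectors/snowflake/trulens/connectors/snowflake/utils/server_side_evaluation_artifacts.py | _remove_leading_spaces
-- ===== SOURCE A (Python) =====
-- def _remove_leading_spaces(q: str) -> str:
--     # Get leading whitespace in first non-empty line.
--     length_of_leading_whitespace = 0
--     leading_whitespace_in_first_non_empty_line = ""
--     for line in q.split("\n"):
--         if line.strip():
--             length_of_leading_whitespace = len(line) - len(line.lstrip())
--             leading_whitespace_in_first_non_empty_line = line[
--                 :length_of_leading_whitespace
--             ]
--             break
--     # Remove the leading whitespace in the first non-empty line from all non-empty lines.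
--     ret = []
--     for line in q.split("\n"):
--         if line.startswith(leading_whitespace_in_first_non_empty_line):
--             ret.append(line[length_of_leading_whitespace:])
--         elif not line.strip():
--             ret.append("")
--         else:
--             raise ValueError()
--     return "\n".join(ret).strip()
-- ===== SOURCE B (Python) =====
-- def _remove_leading_spaces(q: str) -> str:
--     # Single pass: discover the first non-empty line's leading whitespace lazily,
--     # emitting "" for the blank lines seen before it (the final .strip() erases
--     # that region anyway), then apply the three-way rule with the found prefix.
--     prefix = None
--     out = []
--     for line in q.split("\n"):
--         if prefix is None:
--             if line.strip():
--                 k = len(line) - len(line.lstrip())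
--                 prefix = line[:k]
--                 out.append(line[k:])
--             else:
--                 out.append("")
--         elif line.startswith(prefix):
--             out.append(line[len(prefix):])
--         elif not line.strip():
--             out.append("")
--         else:
--             raise ValueError()
--     return "\n".join(out).strip()
-- ===== Notes on version B (the rewrite author's own statement) =====
-- stated objective: alternative
-- what changed: A makes two passes over the list of lines (one to find the first non-blank line's leading whitespace, one to rewrite every line); B makes a single pass with a lazily-determined prefix state, emitting an empty line for each blank line seen before the prefix is known (the final strip erases that region either way).
import Mathlib
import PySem

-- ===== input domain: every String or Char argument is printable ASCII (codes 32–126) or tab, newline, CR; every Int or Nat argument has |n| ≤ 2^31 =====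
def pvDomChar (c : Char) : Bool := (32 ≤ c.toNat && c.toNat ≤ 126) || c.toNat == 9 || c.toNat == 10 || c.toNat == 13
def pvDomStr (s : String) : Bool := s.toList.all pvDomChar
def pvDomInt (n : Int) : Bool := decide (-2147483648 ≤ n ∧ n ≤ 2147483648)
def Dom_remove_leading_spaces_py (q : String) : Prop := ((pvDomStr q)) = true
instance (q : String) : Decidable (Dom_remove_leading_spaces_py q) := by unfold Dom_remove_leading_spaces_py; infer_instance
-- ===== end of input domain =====

-- B replaces A's two passes over the split lines by ONE pass that determines the leading-whitespace
-- prefix lazily (emitting an empty line for each blank line seen before the first non-blank one);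
-- objective: alternative decomposition of the same cost.

-- ===== PORT A =====
-- A's first loop: scan for the first strip-nonempty line, compute
-- (length_of_leading_whitespace, leading_whitespace_in_first_non_empty_line); 'break' = stop at first hit.
def pvA_findPrefix : List (List Char) → Int × List Char
  | [] => (0, [])
  | line :: rest =>
    if PySem.Chars.strip line ≠ [] then
      let k := PySem.Chars.len line - PySem.Chars.len (PySem.Chars.lstrip line)
      (k, PySem.List.slice line none (some k))
    else pvA_findPrefix rest

-- A's second loop body (one line of 'ret'); in the final branch Python raises ValueError —
-- those inputs are exactly the ones excluded by Pre_, the port returns the line unchanged there.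
def pvA_line (k : Int) (p : List Char) (line : List Char) : List Char :=
  if PySem.Chars.startswith line p then PySem.List.slice line (some k) none
  else if PySem.Chars.strip line = [] then []
  else line

def remove_leading_spaces_py (q : String) : String :=
  let lines := PySem.Chars.splitOn q.toList ['\n']
  let kp := pvA_findPrefix lines
  String.ofList (PySem.Chars.strip (PySem.Chars.join ['\n'] (lines.map (pvA_line kp.1 kp.2))))

-- ===== PORT B =====
-- B's single loop: state = none while the prefix is undetermined, some (k, prefix) afterwards.
def pvB_loop : Option (Int × List Char) → List (List Char) → List (List Char)
  | _, [] => []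
  | none, line :: rest =>
    if PySem.Chars.strip line ≠ [] then
      let k := PySem.Chars.len line - PySem.Chars.len (PySem.Chars.lstrip line)
      PySem.List.slice line (some k) none ::
        pvB_loop (some (k, PySem.List.slice line none (some k))) rest
    else [] :: pvB_loop none rest
  | some kp, line :: rest =>
    (if PySem.Chars.startswith line kp.2 then PySem.List.slice line (some kp.1) none
     else if PySem.Chars.strip line = [] then []
     else line  -- Python raises ValueError here; outside Pre_
     ) :: pvB_loop (some kp) rest

def remove_leading_spaces_py_alt (q : String) : String :=
  String.ofList (PySem.Chars.strip
    (PySem.Chars.join ['\n'] (pvB_loop none (PySem.Chars.splitOn q.toList ['\n']))))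

-- ===== PRECONDITION & SPEC =====
-- Pre_ excludes exactly the inputs on which the Python A raises ValueError: some strip-nonempty
-- line does not start with the leading whitespace of the first strip-nonempty line.
def Pre_remove_leading_spaces_py (q : String) : Prop :=
  ∀ l ∈ PySem.Chars.splitOn q.toList ['\n'], PySem.Chars.strip l ≠ [] →
    PySem.Chars.startswith l
      ((((PySem.Chars.splitOn q.toList ['\n']).find?
          (fun x => !(PySem.Chars.strip x).isEmpty)).getD []).takeWhile PySem.Chars.isspace) = true
instance (q : String) : Decidable (Pre_remove_leading_spaces_py q) := by
  unfold Pre_remove_leading_spaces_py; infer_instance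

def pvWitness_remove_leading_spaces_py : String := "  a\n\n   b"

def Spec_remove_leading_spaces_py (q : String) (out : String) : Prop := out = remove_leading_spaces_py_alt q
instance (q : String) (out : String) : Decidable (Spec_remove_leading_spaces_py q out) := by unfold Spec_remove_leading_spaces_py; infer_instance

-- ===== CLAIM (what is proved, stated in full; the proofs are below) =====
def Claim_equal_remove_leading_spaces_py : Prop := ∀ (q : String), Dom_remove_leading_spaces_py q → Pre_remove_leading_spaces_py q → Spec_remove_leading_spaces_py q (remove_leading_spaces_py q)

-- ===== LEMMAS AND PROOFS =====

-- take of the takeWhile-length is takeWhile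
lemma pv_take_takeWhile (w : List Char) (p : Char → Bool) :
    w.take (w.takeWhile p).length = w.takeWhile p := by
  obtain ⟨t, ht⟩ := List.takeWhile_prefix (l := w) (p := p)
  have h2 := List.take_left (l₁ := w.takeWhile p) (l₂ := t)
  rw [ht] at h2; exact h2

lemma pv_dropWhile_ws_append {w u : List Char}
    (h : ∀ c ∈ w, PySem.Chars.isspace c = true) :
    List.dropWhile PySem.Chars.isspace (w ++ u) = List.dropWhile PySem.Chars.isspace u := by
  have hnil : List.dropWhile PySem.Chars.isspace w = [] :=
    List.dropWhile_eq_nil_iff.mpr (fun x hx => h x hx)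
  rw [List.dropWhile_append, hnil]
  simp

-- strip w = [] means every character of w is whitespace
lemma pv_strip_nil_all_ws {w : List Char} (h : PySem.Chars.strip w = [])
    {c : Char} (hc : c ∈ w) : PySem.Chars.isspace c = true := by
  unfold PySem.Chars.strip PySem.Chars.rstrip PySem.Chars.lstrip at h
  rw [List.reverse_eq_nil_iff, List.dropWhile_eq_nil_iff] at h
  have hw := List.takeWhile_append_dropWhile (p := PySem.Chars.isspace) (l := w)
  rw [← hw] at hc
  rcases List.mem_append.mp hc with h1 | h2
  · exact List.mem_takeWhile_imp h1
  · exact h _ (List.mem_reverse.mpr h2)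

-- an all-whitespace prefix does not change strip
lemma pv_strip_ws_append {ws u : List Char}
    (h : ∀ c ∈ ws, PySem.Chars.isspace c = true) :
    PySem.Chars.strip (ws ++ u) = PySem.Chars.strip u := by
  unfold PySem.Chars.strip PySem.Chars.lstrip
  rw [pv_dropWhile_ws_append h]

-- join over a nonempty tail
lemma pv_join_cons_ne_nil (a : List Char) {ls : List (List Char)} (h : ls ≠ []) :
    PySem.Chars.join ['\n'] (a :: ls) = a ++ ['\n'] ++ PySem.Chars.join ['\n'] ls := by
  cases ls with
  | nil => exact absurd rfl h
  | cons b bs => exact PySem.Chars.join_cons_cons ['\n'] a b bs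

-- all-whitespace lines join-and-strip to []
lemma pv_strip_join_ws {ls : List (List Char)}
    (h : ∀ w ∈ ls, ∀ c ∈ w, PySem.Chars.isspace c = true) :
    PySem.Chars.strip (PySem.Chars.join ['\n'] ls) = [] := by
  induction ls with
  | nil => rw [PySem.Chars.join_nil]; rfl
  | cons a tl ih =>
    cases tl with
    | nil =>
      rw [PySem.Chars.join_singleton]
      have h2 := pv_strip_ws_append (ws := a) (u := ([] : List Char))
        (fun c hc => h a (List.mem_cons_self) c hc)
      simpa using h2
    | cons b bs =>
      rw [PySem.Chars.join_cons_cons]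
      rw [pv_strip_ws_append (ws := a ++ ['\n'])
        (fun c hc => by
          rcases List.mem_append.mp hc with h1 | h2
          · exact h a List.mem_cons_self c h1
          · simp at h2; subst h2; decide)]
      exact ih (fun w hw => h w (List.mem_cons_of_mem _ hw))

-- an all-whitespace block of lines in front is erased by the final strip
lemma pv_strip_join_drop {as : List (List Char)} (b : List Char) (bs : List (List Char))
    (h : ∀ w ∈ as, ∀ c ∈ w, PySem.Chars.isspace c = true) :
    PySem.Chars.strip (PySem.Chars.join ['\n'] (as ++ b :: bs)) =
      PySem.Chars.strip (PySem.Chars.join ['\n'] (b :: bs)) := by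
  induction as with
  | nil => rfl
  | cons a as' ih =>
    rw [List.cons_append, pv_join_cons_ne_nil a (by simp)]
    rw [pv_strip_ws_append (ws := a ++ ['\n'])
      (fun c hc => by
        rcases List.mem_append.mp hc with h1 | h2
        · exact h a List.mem_cons_self c h1
        · simp at h2; subst h2; decide)]
    exact ih (fun w hw => h w (List.mem_cons_of_mem _ hw))

-- the computed slice length is the length of the whitespace prefix
lemma pv_kp_eq (l0 : List Char) :
    PySem.Chars.len l0 - PySem.Chars.len (PySem.Chars.lstrip l0) =
      ((l0.takeWhile PySem.Chars.isspace).length : Int) := by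
  have hlen : (l0.takeWhile PySem.Chars.isspace).length
      + (l0.dropWhile PySem.Chars.isspace).length = l0.length := by
    rw [← List.length_append, List.takeWhile_append_dropWhile]
  simp only [PySem.Chars.len_eq, PySem.Chars.lstrip]
  omega

lemma pv_slice_prefix (l0 : List Char) :
    PySem.List.slice l0 none (some ((l0.takeWhile PySem.Chars.isspace).length : Int)) =
      l0.takeWhile PySem.Chars.isspace := by
  rw [PySem.List.slice_to _ (Int.natCast_nonneg _)]
  rw [Int.toNat_natCast]
  exact pv_take_takeWhile l0 _

-- A's first loop on a block of blank lines followed by a non-blank one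
lemma pvA_findPrefix_eq {pre : List (List Char)} {l0 : List Char} (rest : List (List Char))
    (hpre : ∀ w ∈ pre, PySem.Chars.strip w = []) (h0 : PySem.Chars.strip l0 ≠ []) :
    pvA_findPrefix (pre ++ l0 :: rest) =
      (((l0.takeWhile PySem.Chars.isspace).length : Int), l0.takeWhile PySem.Chars.isspace) := by
  induction pre with
  | nil =>
    simp only [List.nil_append, pvA_findPrefix, if_pos h0]
    rw [pv_kp_eq l0, pv_slice_prefix l0]
  | cons w ws ih =>
    rw [List.cons_append]
    simp only [pvA_findPrefix]
    rw [if_neg (by simp [hpre w List.mem_cons_self])]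
    exact ih (fun x hx => hpre x (List.mem_cons_of_mem _ hx))

lemma pvA_findPrefix_all_blank {ls : List (List Char)}
    (h : ∀ w ∈ ls, PySem.Chars.strip w = []) : pvA_findPrefix ls = (0, []) := by
  induction ls with
  | nil => rfl
  | cons w ws ih =>
    simp only [pvA_findPrefix]
    rw [if_neg (by simp [h w List.mem_cons_self])]
    exact ih (fun x hx => h x (List.mem_cons_of_mem _ hx))

-- B's loop once the prefix is fixed is exactly A's second loop
lemma pvB_loop_some (kp : Int × List Char) (ls : List (List Char)) :
    pvB_loop (some kp) ls = ls.map (pvA_line kp.1 kp.2) := by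
  induction ls with
  | nil => rfl
  | cons a tl ih => simp only [pvB_loop, pvA_line, List.map_cons, ih]

-- B's loop over leading blank lines emits []
lemma pvB_loop_none_blank {pre : List (List Char)} (ls : List (List Char))
    (hpre : ∀ w ∈ pre, PySem.Chars.strip w = []) :
    pvB_loop none (pre ++ ls) = pre.map (fun _ => []) ++ pvB_loop none ls := by
  induction pre with
  | nil => rfl
  | cons w ws ih =>
    rw [List.cons_append]
    simp only [pvB_loop]
    rw [if_neg (by simp [hpre w List.mem_cons_self])]
    rw [List.map_cons, List.cons_append]
    rw [ih (fun x hx => hpre x (List.mem_cons_of_mem _ hx))]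

-- ===== VERDICT (by name: the statement is the Claim_ definition above) =====
theorem remove_leading_spaces_py_spec : Claim_equal_remove_leading_spaces_py := by
  intro q _ _
  unfold Spec_remove_leading_spaces_py remove_leading_spaces_py remove_leading_spaces_py_alt
  dsimp only
  set lines := PySem.Chars.splitOn q.toList ['\n'] with hlines
  cases hf : lines.find? (fun x => !(PySem.Chars.strip x).isEmpty) with
  | none =>
    have hall : ∀ w ∈ lines, PySem.Chars.strip w = [] := by
      intro w hw
      have := List.find?_eq_none.mp hf w hw
      simpa using this
    rw [pvA_findPrefix_all_blank hall]
    have hmap : lines.map (pvA_line 0 []) = lines := by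
      rw [List.map_congr_left (g := id) (fun w _ => by
        simp only [pvA_line, id]
        rw [if_pos (by rw [PySem.Chars.startswith_iff]; exact List.nil_prefix)]
        rw [PySem.List.slice_from _ (le_refl 0)]
        rfl)]
      exact List.map_id lines
    have hB : pvB_loop none lines = lines.map (fun _ => []) := by
      have h2 := pvB_loop_none_blank (pre := lines) [] hall
      rw [List.append_nil] at h2
      rw [show pvB_loop none ([] : List (List Char)) = [] from rfl, List.append_nil] at h2
      exact h2
    rw [hmap, hB]
    rw [pv_strip_join_ws (fun w hw c hc => pv_strip_nil_all_ws (hall w hw) hc)]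
    rw [pv_strip_join_ws (fun w hw c hc => by
      rcases List.mem_map.mp hw with ⟨x, _, hx⟩
      rw [← hx] at hc; simp at hc)]
  | some l0 =>
    obtain ⟨hp0, pre, rest, hsplit, hpre'⟩ := List.find?_eq_some_iff_append.mp hf
    have h0 : PySem.Chars.strip l0 ≠ [] := by simpa using hp0
    have hpre : ∀ w ∈ pre, PySem.Chars.strip w = [] := by
      intro w hw
      have := hpre' w hw
      simpa using this
    rw [hsplit, pvA_findPrefix_eq rest hpre h0]
    set p := l0.takeWhile PySem.Chars.isspace with hp
    set k := ((p.length : Nat) : Int) with hk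
    -- B's loop: blank prefix, then the defining line, then the mapped tail
    rw [pvB_loop_none_blank (l0 :: rest) hpre]
    have hBstep : pvB_loop none (l0 :: rest) =
        PySem.List.slice l0 (some k) none :: (rest.map (pvA_line k p)) := by
      simp only [pvB_loop, if_pos h0]
      rw [pv_kp_eq l0, pv_slice_prefix l0, pvB_loop_some]
    rw [hBstep]
    -- A's map splits over the decomposition
    rw [List.map_append, List.map_cons]
    have hA0 : pvA_line k p l0 = PySem.List.slice l0 (some k) none := by
      simp only [pvA_line]
      rw [if_pos (by rw [PySem.Chars.startswith_iff]; exact List.takeWhile_prefix _)]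
    rw [hA0]
    -- both all-whitespace lead blocks vanish under the final strip
    rw [pv_strip_join_drop (PySem.List.slice l0 (some k) none) (rest.map (pvA_line k p))
      (fun w hw c hc => by
        rcases List.mem_map.mp hw with ⟨x, hx, hxw⟩
        have hxblank := hpre x hx
        rw [← hxw] at hc
        simp only [pvA_line] at hc
        by_cases h1 : PySem.Chars.startswith x p = true
        · rw [if_pos h1] at hc
          rw [PySem.List.slice_from _ (Int.natCast_nonneg _)] at hc
          exact pv_strip_nil_all_ws hxblank (List.mem_of_mem_drop hc)
        · rw [if_neg h1, if_pos hxblank] at hc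
          simp at hc)]
    rw [pv_strip_join_drop (PySem.List.slice l0 (some k) none) (rest.map (pvA_line k p))
      (fun w hw c hc => by
        rcases List.mem_map.mp hw with ⟨x, _, hxw⟩
        rw [← hxw] at hc; simp at hc)]
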